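-- pv_equiv track=rewrite | github.com/dipoleman/de-py-katas | src/multiplication_table/multiplication_table.py | multiplication_table_mod_Z
-- ===== SOURCE A (Python) =====
-- def multiplication_table_mod_Z(num):
--     row = [x for x in range(num)]
--     mul_table = [row]
--
--     for col in range(1,num):
--         new_row = [x*row[col]%num for x in range(1,num)]
--         new_row.insert(0,row[col])
--         mul_table.append(new_row)
--
--     return mul_table
-- ===== SOURCE B (Python) =====
-- def multiplication_table_mod_Z(num):
--     # Strength-reduced: each row i is generated by a running sum v += i (mod num),
--     # so the table needs no multiplication at all; row 0 is the index row.
--     if num < 1: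
--         return [[]]
--     def row(i):
--         r, v = [i], i % num
--         for _ in range(1, num):
--             r.append(v)
--             v = (v + i) % num
--         return r
--     return [list(range(num))] + [row(i) for i in range(1, num)]
-- ===== Notes on version B (the rewrite author's own statement) =====
-- stated objective: alternative
-- what changed: Each row is generated by strength reduction -- a running sum v = (v + i) % num appended step by step, no multiplication and no index lookup -- instead of A's seeded row 0 plus per-row 'map x*row[col]%num then insert at 0' loop.
import Mathlib
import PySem

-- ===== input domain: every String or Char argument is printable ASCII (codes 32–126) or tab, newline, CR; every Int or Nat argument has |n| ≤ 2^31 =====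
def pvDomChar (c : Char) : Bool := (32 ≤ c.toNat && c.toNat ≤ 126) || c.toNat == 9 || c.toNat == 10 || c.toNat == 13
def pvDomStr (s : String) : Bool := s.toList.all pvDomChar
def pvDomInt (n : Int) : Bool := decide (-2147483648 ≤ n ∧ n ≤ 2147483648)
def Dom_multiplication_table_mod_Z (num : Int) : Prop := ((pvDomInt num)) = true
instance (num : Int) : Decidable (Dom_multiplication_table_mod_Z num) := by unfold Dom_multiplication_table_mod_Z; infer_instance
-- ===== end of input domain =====

-- B generates each row by a running sum v += i (mod num) — no multiplication —
-- instead of A's seeded row 0 plus per-row map-then-insert loop; same values.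

-- ===== PORT A =====
-- row[col] is always in range (1 ≤ col < num = len row), so pyGetD with default 0 is exact here.
def multiplication_table_mod_Z (num : Int) : List (List Int) :=
  let row := PySem.List.pyRange 0 num 1
  (PySem.List.pyRange 1 num 1).foldl
    (fun mul_table col =>
      let new_row :=
        (PySem.List.pyRange 1 num 1).map
          (fun x => PySem.Int.mod (x * PySem.List.pyGetD row col 0) num)
      mul_table ++ [PySem.List.insert new_row 0 (PySem.List.pyGetD row col 0)])
    [row]

-- ===== PORT B =====
-- Source B's inner 'for _ in range(1, num)' with state (r, v); r = p.1, v = p.2.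
def pvAltRow (num i : Int) : List Int :=
  ((PySem.List.pyRange 1 num 1).foldl
    (fun (p : List Int × Int) _ => (p.1 ++ [p.2], PySem.Int.mod (p.2 + i) num))
    ([i], PySem.Int.mod i num)).1

def multiplication_table_mod_Z_alt (num : Int) : List (List Int) :=
  if num < 1 then [[]]
  else [PySem.List.pyRange 0 num 1] ++ (PySem.List.pyRange 1 num 1).map (pvAltRow num)

-- ===== PRECONDITION & SPEC =====
def Spec_multiplication_table_mod_Z (num : Int) (out : List (List Int)) : Prop := out = multiplication_table_mod_Z_alt num
instance (num : Int) (out : List (List Int)) : Decidable (Spec_multiplication_table_mod_Z num out) := by unfold Spec_multiplication_table_mod_Z; infer_instance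

-- ===== CLAIM (what is proved, stated in full; the proofs are below) =====
def Claim_equal_multiplication_table_mod_Z : Prop := ∀ (num : Int), Dom_multiplication_table_mod_Z num → Spec_multiplication_table_mod_Z num (multiplication_table_mod_Z num)

-- ===== LEMMAS AND PROOFS =====

-- indexing the range row gives back the index
theorem pv_getD_range (num col : Int) (h0 : 0 ≤ col) (h1 : col < num) :
    PySem.List.pyGetD (PySem.List.pyRange 0 num 1) col 0 = col := by
  have := PySem.List.pyGetD_map_pyRange_of_nonneg (f := fun j => j) (n := num) (i := col) (d := 0) h0 h1
  simpa using this

-- the running-sum accumulator of B's inner loop produces consecutive multiples of i mod num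
theorem pv_scan (num i : Int) (hnum : 0 < num) (l : List Int) :
    ∀ (acc : List Int) (t : Int),
      (l.foldl (fun (p : List Int × Int) _ => (p.1 ++ [p.2], PySem.Int.mod (p.2 + i) num))
        (acc, PySem.Int.mod (i * t) num)).1
      = acc ++ (List.range l.length).map (fun k : Nat => PySem.Int.mod (i * (t + (k:Int))) num) := by
  induction l with
  | nil => intro acc t; simp
  | cons x l ih =>
    intro acc t
    have hstep : PySem.Int.mod (PySem.Int.mod (i * t) num + i) num
        = PySem.Int.mod (i * (t + 1)) num := by
      rw [PySem.Int.mod_eq_emod_of_pos hnum, PySem.Int.mod_eq_emod_of_pos hnum,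
          PySem.Int.mod_eq_emod_of_pos hnum, Int.emod_add_emod]
      ring_nf
    simp only [List.foldl_cons, hstep]
    rw [ih (acc ++ [PySem.Int.mod (i * t) num]) (t + 1)]
    rw [List.length_cons, List.range_succ_eq_map, List.map_cons, List.map_map]
    simp only [List.append_assoc, List.singleton_append, Nat.cast_zero, add_zero]
    congr 2
    apply List.map_congr_left
    intro k _
    simp only [Function.comp]
    congr 1
    push_cast
    ring

-- B's row i equals i followed by the multiples i*1, …, i*(num-1) mod num
theorem pv_altRow (num i : Int) (hnum : 0 < num) :
    pvAltRow num i
      = i :: (PySem.List.pyRange 1 num 1).map (fun x => PySem.Int.mod (x * i) num) := by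
  unfold pvAltRow
  have h0 : PySem.Int.mod i num = PySem.Int.mod (i * 1) num := by rw [mul_one]
  rw [h0, pv_scan num i hnum _ [i] 1]
  rw [PySem.List.pyRange_one 1 num, List.length_map, List.length_range, List.map_map]
  simp only [List.singleton_append]
  congr 1
  apply List.map_congr_left
  intro k _
  simp only [Function.comp]
  rw [mul_comm]

theorem pv_equal (num : Int) :
    multiplication_table_mod_Z num = multiplication_table_mod_Z_alt num := by
  unfold multiplication_table_mod_Z multiplication_table_mod_Z_alt
  by_cases hn : num < 1
  · have h0 : PySem.List.pyRange 0 num 1 = [] := PySem.List.pyRange_one_eq_nil (by omega)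
    have h1 : PySem.List.pyRange 1 num 1 = [] := PySem.List.pyRange_one_eq_nil (by omega)
    simp [h0, h1, hn]
  · have hpos : (0:Int) < num := by omega
    rw [if_neg hn]
    rw [PySem.List.foldl_append_singleton_eq_map]
    congr 1
    apply List.map_congr_left
    intro col hcol
    have hcb : 1 ≤ col ∧ col < num := (PySem.List.mem_pyRange_one).1 hcol
    rw [pv_getD_range num col (by omega) hcb.2]
    rw [PySem.List.insert_zero, pv_altRow num col hpos]

-- ===== VERDICT (by name: the statement is the Claim_ definition above) =====
theorem multiplication_table_mod_Z_spec : Claim_equal_multiplication_table_mod_Z := by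
  intro num _
  exact pv_equal num
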